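-- pv_equiv track=rewrite | github.com/michallicko/leadgen | api/routes/company_routes.py | _derive_stage
-- ===== SOURCE A (Python) =====
-- _STAGE_ORDER = ["l1", "triage", "l2", "person", "generate", "review"]
--
-- _STAGE_LABELS = {
--     "l1": "Classified",
--     "triage": "Qualified",
--     "l2": "Researched",
--     "person": "Contacts Ready",
--     "generate": "Messages Generated",
--     "review": "Ready for Outreach",
-- }
--
-- def _derive_stage(completions, status=None):
--     """Compute derived stage label from entity_stage_completions.
--
--     Returns dict with label and stage key, or None if no completions.
--     """
--     if not completions:
--         return {"label": "New", "stage": None}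
--
--     completed = {c["stage"] for c in completions if c["status"] == "completed"}
--
--     # Walk stage order in reverse to find the latest completed
--     for stage in reversed(_STAGE_ORDER):
--         if stage in completed:
--             return {"label": _STAGE_LABELS[stage], "stage": stage}
--
--     # Has completions but none in our stage order (e.g., all failed)
--     return {"label": "New", "stage": None}
-- ===== SOURCE B (Python) =====
-- _STAGE_ORDER = ["l1", "triage", "l2", "person", "generate", "review"]
--
-- _STAGE_LABELS = {
--     "l1": "Classified",
--     "triage": "Qualified",
--     "l2": "Researched",
--     "person": "Contacts Ready",
--     "generate": "Messages Generated",
--     "review": "Ready for Outreach",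
-- }
--
--
-- def _derive_stage(completions, status=None):
--     """Single-pass argmax over a stage->rank map instead of set + reverse scan."""
--     if not completions:
--         return {"label": "New", "stage": None}
--
--     rank = {s: i for i, s in enumerate(_STAGE_ORDER)}
--     best = None
--     best_rank = -1
--     for c in completions:
--         if c["status"] == "completed":
--             s = c["stage"]
--             r = rank.get(s, -1)
--             if r > best_rank:
--                 best_rank = r
--                 best = s
--
--     if best is None:
--         return {"label": "New", "stage": None}
--     return {"label": _STAGE_LABELS[best], "stage": best}
-- ===== Notes on version B (the rewrite author's own statement) =====
-- stated objective: alternative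
-- what changed: Replaces A's build-a-set-of-completed-stages plus reverse scan of _STAGE_ORDER with a single argmax pass over completions using a stage->rank map, finalised after the loop.
import Mathlib
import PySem

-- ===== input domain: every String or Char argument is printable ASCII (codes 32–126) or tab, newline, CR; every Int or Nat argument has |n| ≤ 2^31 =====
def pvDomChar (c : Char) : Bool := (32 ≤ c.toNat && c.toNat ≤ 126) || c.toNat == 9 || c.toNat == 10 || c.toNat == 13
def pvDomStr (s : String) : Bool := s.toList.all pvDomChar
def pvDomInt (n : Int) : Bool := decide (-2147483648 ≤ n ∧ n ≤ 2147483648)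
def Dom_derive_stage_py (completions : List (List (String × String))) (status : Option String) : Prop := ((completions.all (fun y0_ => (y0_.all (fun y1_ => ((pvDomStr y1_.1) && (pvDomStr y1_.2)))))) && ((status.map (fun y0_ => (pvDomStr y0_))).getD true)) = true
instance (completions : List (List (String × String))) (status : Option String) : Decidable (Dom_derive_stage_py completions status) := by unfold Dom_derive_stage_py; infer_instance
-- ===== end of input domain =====

-- B replaces A's completed-stage set plus reverse scan of the stage order with a single
-- argmax pass over completions using a stage->rank map (alternative decomposition, same cost).

-- ===== PORT A =====
def pvStageOrder : List String := ["l1", "triage", "l2", "person", "generate", "review"]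

def pvStageLabels : PySem.Dict String String := PySem.Dict.mk
  [("l1", "Classified"), ("triage", "Qualified"), ("l2", "Researched"),
   ("person", "Contacts Ready"), ("generate", "Messages Generated"), ("review", "Ready for Outreach")]

-- c["k"]: first-match dict lookup; total form, used only under Pre_ (key present where accessed)
def pvLookD (c : List (String × String)) (k : String) : String :=
  PySem.Dict.getD (PySem.Dict.mk c) k ""

-- {c["stage"] for c in completions if c["status"] == "completed"}
def pvCompletedSet (completions : List (List (String × String))) : PySem.Set String :=
  completions.foldl
    (fun s c => if pvLookD c "status" = "completed" then PySem.Set.add s (pvLookD c "stage") else s)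
    PySem.Set.empty

-- the for-loop over reversed(_STAGE_ORDER) with its early return
def pvRevLoop (completed : PySem.Set String) : List String → List (String × Option String)
  | [] => [("label", some "New"), ("stage", none)]
  | s :: rest =>
      if PySem.Set.contains completed s then
        [("label", some (PySem.Dict.getD pvStageLabels s "")), ("stage", some s)]
      else pvRevLoop completed rest

def derive_stage_py (completions : List (List (String × String))) (status : Option String) : List (String × Option String) :=
  if completions = [] then [("label", some "New"), ("stage", none)]
  else pvRevLoop (pvCompletedSet completions) pvStageOrder.reverse

-- ===== PORT B =====
-- rank = {s: i for i, s in enumerate(_STAGE_ORDER)}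
def pvRankMap : PySem.Dict String Int :=
  (PySem.List.enumerate pvStageOrder).foldl (fun d p => d.insert p.2 p.1) PySem.Dict.empty

-- one iteration of B's for-loop; state = (best, best_rank)
def pvBStep (st : Option String × Int) (c : List (String × String)) : Option String × Int :=
  if pvLookD c "status" = "completed" then
    let s := pvLookD c "stage"
    let r := PySem.Dict.getD pvRankMap s (-1)
    if st.2 < r then (some s, r) else st
  else st

def derive_stage_py_alt (completions : List (List (String × String))) (status : Option String) : List (String × Option String) :=
  if completions = [] then [("label", some "New"), ("stage", none)]
  else
    match completions.foldl pvBStep (none, -1) with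
    | (none, _) => [("label", some "New"), ("stage", none)]
    | (some s, _) => [("label", some (PySem.Dict.getD pvStageLabels s "")), ("stage", some s)]

-- ===== PRECONDITION & SPEC =====
-- Pre_ excludes exactly the inputs where A raises KeyError: a completion dict without a
-- "status" key, or a completed one without a "stage" key.
def Pre_derive_stage_py (completions : List (List (String × String))) (status : Option String) : Prop :=
  ∀ c ∈ completions,
    PySem.Dict.contains (PySem.Dict.mk c) "status" = true ∧
    (PySem.Dict.getD (PySem.Dict.mk c) "status" "" = "completed" →
      PySem.Dict.contains (PySem.Dict.mk c) "stage" = true)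
instance (completions : List (List (String × String))) (status : Option String) : Decidable (Pre_derive_stage_py completions status) := by unfold Pre_derive_stage_py; infer_instance

def pvWitness_derive_stage_py : (List (List (String × String))) × Option String :=
  ([[("stage", "l1"), ("status", "completed")], [("stage", "zzz"), ("status", "failed")]], none)

def Spec_derive_stage_py (completions : List (List (String × String))) (status : Option String) (out : List (String × Option String)) : Prop := out = derive_stage_py_alt completions status
instance (completions : List (List (String × String))) (status : Option String) (out : List (String × Option String)) : Decidable (Spec_derive_stage_py completions status out) := by unfold Spec_derive_stage_py; infer_instance

-- ===== CLAIM (what is proved, stated in full; the proofs are below) =====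
def Claim_equal_derive_stage_py : Prop := ∀ (completions : List (List (String × String))) (status : Option String), Dom_derive_stage_py completions status → Pre_derive_stage_py completions status → Spec_derive_stage_py completions status (derive_stage_py completions status)

-- ===== LEMMAS AND PROOFS =====

-- the multiset of stages contributed by completed entries, in order
def pvStages (completions : List (List (String × String))) : List String :=
  completions.filterMap
    (fun c => if pvLookD c "status" = "completed" then some (pvLookD c "stage") else none)

-- the value B's loop state reaches, as a function of which stages occur
def pvBestOf (l : List String) : Option String × Int :=
  if "review" ∈ l then (some "review", 5)
  else if "generate" ∈ l then (some "generate", 4)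
  else if "person" ∈ l then (some "person", 3)
  else if "l2" ∈ l then (some "l2", 2)
  else if "triage" ∈ l then (some "triage", 1)
  else if "l1" ∈ l then (some "l1", 0)
  else (none, -1)

theorem pvMemFoldAux (cs : List (List (String × String))) (acc : PySem.Set String) (x : String) :
    x ∈ cs.foldl
      (fun s c => if pvLookD c "status" = "completed" then PySem.Set.add s (pvLookD c "stage") else s)
      acc ↔ x ∈ acc ∨ x ∈ pvStages cs := by
  induction cs generalizing acc with
  | nil => simp [pvStages]
  | cons c cs ih =>
      by_cases hc : pvLookD c "status" = "completed" <;>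
        simp [List.foldl_cons, hc, ih, PySem.Set.mem_add, pvStages] <;> tauto

theorem pvMem_completedSet (completions : List (List (String × String))) (x : String) :
    x ∈ pvCompletedSet completions ↔ x ∈ pvStages completions := by
  simpa [pvCompletedSet, PySem.Set.empty] using pvMemFoldAux completions PySem.Set.empty x

theorem pvRank_other (s : String) (h5 : s ≠ "review") (h4 : s ≠ "generate")
    (h3 : s ≠ "person") (h2 : s ≠ "l2") (h1 : s ≠ "triage") (h0 : s ≠ "l1") :
    PySem.Dict.getD pvRankMap s (-1) = -1 := by
  have hmap : pvRankMap = PySem.Dict.mk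
      [("l1", 0), ("triage", 1), ("l2", 2), ("person", 3), ("generate", 4), ("review", 5)] := by
    decide
  rw [hmap]
  simp [PySem.Dict.getD, PySem.Dict.get?,
    Ne.symm h5, Ne.symm h4, Ne.symm h3, Ne.symm h2, Ne.symm h1, Ne.symm h0]

set_option maxHeartbeats 8000000 in
theorem pvBStep_bestOf (l : List String) (c : List (String × String)) :
    pvBStep (pvBestOf l) c =
      pvBestOf (l ++ (if pvLookD c "status" = "completed" then [pvLookD c "stage"] else [])) := by
  by_cases hc : pvLookD c "status" = "completed"
  · simp only [hc, if_true]
    by_cases h5 : pvLookD c "stage" = "review"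
    · simp only [pvBStep, hc, if_true, h5]
      rw [show PySem.Dict.getD pvRankMap "review" (-1) = 5 from by decide]
      simp only [pvBestOf, List.mem_append, List.mem_singleton]
      split_ifs <;> simp_all
    by_cases h4 : pvLookD c "stage" = "generate"
    · simp only [pvBStep, hc, if_true, h4]
      rw [show PySem.Dict.getD pvRankMap "generate" (-1) = 4 from by decide]
      simp only [pvBestOf, List.mem_append, List.mem_singleton]
      split_ifs <;> simp_all
    by_cases h3 : pvLookD c "stage" = "person"
    · simp only [pvBStep, hc, if_true, h3]
      rw [show PySem.Dict.getD pvRankMap "person" (-1) = 3 from by decide]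
      simp only [pvBestOf, List.mem_append, List.mem_singleton]
      split_ifs <;> simp_all
    by_cases h2 : pvLookD c "stage" = "l2"
    · simp only [pvBStep, hc, if_true, h2]
      rw [show PySem.Dict.getD pvRankMap "l2" (-1) = 2 from by decide]
      simp only [pvBestOf, List.mem_append, List.mem_singleton]
      split_ifs <;> simp_all
    by_cases h1 : pvLookD c "stage" = "triage"
    · simp only [pvBStep, hc, if_true, h1]
      rw [show PySem.Dict.getD pvRankMap "triage" (-1) = 1 from by decide]
      simp only [pvBestOf, List.mem_append, List.mem_singleton]
      split_ifs <;> simp_all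
    by_cases h0 : pvLookD c "stage" = "l1"
    · simp only [pvBStep, hc, if_true, h0]
      rw [show PySem.Dict.getD pvRankMap "l1" (-1) = 0 from by decide]
      simp only [pvBestOf, List.mem_append, List.mem_singleton]
      split_ifs <;> simp_all
    · simp only [pvBStep, hc, if_true]
      rw [pvRank_other (pvLookD c "stage") h5 h4 h3 h2 h1 h0]
      simp only [pvBestOf, List.mem_append, List.mem_singleton]
      split_ifs <;> simp_all
  · simp [pvBStep, pvBestOf, hc]

theorem pvFoldl_bestOf (completions : List (List (String × String))) :
    completions.foldl pvBStep (none, -1) = pvBestOf (pvStages completions) := by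
  induction completions using List.reverseRecOn with
  | nil => simp [pvStages, pvBestOf]
  | append_singleton cs c ih =>
      rw [List.foldl_append, List.foldl_cons, List.foldl_nil, ih, pvBStep_bestOf]
      congr 1
      simp [pvStages, List.filterMap_append, List.filterMap_cons]
      split_ifs <;> rfl

-- ===== VERDICT (by name: the statement is the Claim_ definition above) =====
theorem derive_stage_py_spec : Claim_equal_derive_stage_py := by
  intro completions status _ _
  unfold Spec_derive_stage_py
  by_cases h : completions = []
  · simp [derive_stage_py, derive_stage_py_alt, h]
  · have hcontains : ∀ x, PySem.Set.contains (pvCompletedSet completions) x =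
        decide (x ∈ pvStages completions) := by
      intro x
      by_cases hx : x ∈ pvStages completions
      · simp only [hx, decide_true]
        exact (PySem.Set.contains_iff _ _).2 ((pvMem_completedSet completions x).2 hx)
      · simp only [hx, decide_false]
        by_contra hcon
        exact hx ((pvMem_completedSet completions x).1
          ((PySem.Set.contains_iff _ _).1 (by simpa using hcon)))
    rw [derive_stage_py, derive_stage_py_alt, if_neg h, if_neg h, pvFoldl_bestOf]
    rw [show pvStageOrder.reverse = ["review", "generate", "person", "l2", "triage", "l1"] from rfl]
    simp only [pvRevLoop, hcontains, pvBestOf, decide_eq_true_eq]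
    split_ifs <;> rfl
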